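-- pv_equiv track=rewrite | github.com/TomasBahnik/pslib | python/alp/cv11/adam7_alg.py | sample_positions
-- ===== SOURCE A (Python) =====
-- adam7_pattern = [[1, 6, 4, 6, 2, 6, 4, 6],
--                  [7, 7, 7, 7, 7, 7, 7, 7],
--                  [5, 6, 5, 6, 5, 6, 5, 6],
--                  [7, 7, 7, 7, 7, 7, 7, 7],
--                  [3, 6, 4, 6, 3, 6, 4, 6],
--                  [7, 7, 7, 7, 7, 7, 7, 7],
--                  [5, 6, 5, 6, 5, 6, 5, 6],
--                  [7, 7, 7, 7, 7, 7, 7, 7]]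
--
-- def sample_positions(p):
--     all_rows = []
--     for i in range(len(adam7_pattern)):
--         one_row = []
--         for j in range(len(adam7_pattern[i])):
--             if adam7_pattern[i][j] == p:
--                 one_row += [[i, j]]
--         all_rows.append(one_row)
--     return all_rows
-- ===== SOURCE B (Python) =====
-- adam7_pattern = [[1, 6, 4, 6, 2, 6, 4, 6],
--                  [7, 7, 7, 7, 7, 7, 7, 7],
--                  [5, 6, 5, 6, 5, 6, 5, 6],
--                  [7, 7, 7, 7, 7, 7, 7, 7],
--                  [3, 6, 4, 6, 3, 6, 4, 6],
--                  [7, 7, 7, 7, 7, 7, 7, 7],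
--                  [5, 6, 5, 6, 5, 6, 5, 6],
--                  [7, 7, 7, 7, 7, 7, 7, 7]]
--
-- def _build_table():
--     table = {}
--     for i, row in enumerate(adam7_pattern):
--         for j, v in enumerate(row):
--             table.setdefault(v, [[] for _ in range(len(adam7_pattern))])[i].append([i, j])
--     return table
--
-- _TABLE = _build_table()
--
-- def sample_positions(p):
--     return _TABLE.get(p, [[] for _ in range(len(adam7_pattern))])
-- ===== Notes on version B (the rewrite author's own statement) =====
-- stated objective: alternative
-- what changed: Replaces the per-call nested scan of the 8x8 pattern with a value->rows index built once at module scope; each call is a single dict lookup (with an 8-empty-rows default for absent values).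
import Mathlib
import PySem

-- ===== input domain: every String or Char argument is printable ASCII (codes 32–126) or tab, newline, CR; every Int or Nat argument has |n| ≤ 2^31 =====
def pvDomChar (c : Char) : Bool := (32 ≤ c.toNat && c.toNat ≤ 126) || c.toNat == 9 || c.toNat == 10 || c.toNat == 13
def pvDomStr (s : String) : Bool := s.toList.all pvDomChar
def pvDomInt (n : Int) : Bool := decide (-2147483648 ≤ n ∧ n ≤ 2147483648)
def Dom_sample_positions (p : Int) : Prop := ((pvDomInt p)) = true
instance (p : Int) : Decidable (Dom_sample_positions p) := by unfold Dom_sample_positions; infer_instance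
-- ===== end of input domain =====

-- B replaces A's per-call nested scan with a module-scope index (value → rows of positions) built once, then a single dict lookup per call (objective: alternative decomposition; per-call work becomes one lookup).

-- ===== PORT A =====
def adam7_pattern : List (List Int) :=
  [[1, 6, 4, 6, 2, 6, 4, 6],
   [7, 7, 7, 7, 7, 7, 7, 7],
   [5, 6, 5, 6, 5, 6, 5, 6],
   [7, 7, 7, 7, 7, 7, 7, 7],
   [3, 6, 4, 6, 3, 6, 4, 6],
   [7, 7, 7, 7, 7, 7, 7, 7],
   [5, 6, 5, 6, 5, 6, 5, 6],
   [7, 7, 7, 7, 7, 7, 7, 7]]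

def sample_positions (p : Int) : List (List (List Int)) :=
  (PySem.List.pyRange 0 (PySem.List.len adam7_pattern) 1).foldl
    (fun all_rows i =>
      let row := PySem.List.pyGetD adam7_pattern i []
      let one_row := (PySem.List.pyRange 0 (PySem.List.len row) 1).foldl
        (fun one_row j =>
          if PySem.List.pyGetD row j 0 == p then one_row ++ [[i, j]] else one_row) []
      all_rows ++ [one_row]) []

-- ===== PORT B =====
def pvEmptyRows : List (List (List Int)) :=
  (PySem.List.pyRange 0 (PySem.List.len adam7_pattern) 1).map (fun _ => [])

def pvTable : PySem.Dict Int (List (List (List Int))) :=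
  (PySem.List.enumerate adam7_pattern).foldl
    (fun tbl ir =>
      (PySem.List.enumerate ir.2).foldl
        (fun tbl jv =>
          let tbl := tbl.setdefault jv.2 pvEmptyRows
          tbl.modify jv.2 []
            (fun rows =>
              PySem.List.pySetD rows ir.1
                (PySem.List.pyGetD rows ir.1 [] ++ [[ir.1, jv.1]])))
        tbl)
    PySem.Dict.empty

def sample_positions_alt (p : Int) : List (List (List Int)) :=
  pvTable.getD p pvEmptyRows

-- ===== PRECONDITION & SPEC =====
def Spec_sample_positions (p : Int) (out : List (List (List Int))) : Prop := out = sample_positions_alt p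
instance (p : Int) (out : List (List (List Int))) : Decidable (Spec_sample_positions p out) := by unfold Spec_sample_positions; infer_instance

-- ===== CLAIM (what is proved, stated in full; the proofs are below) =====
def Claim_equal_sample_positions : Prop := ∀ (p : Int), Dom_sample_positions p → Spec_sample_positions p (sample_positions p)

-- ===== LEMMAS AND PROOFS =====
set_option maxRecDepth 100000
lemma pv_miss (p : Int) (h1 : p ≠ 1) (h2 : p ≠ 2) (h3 : p ≠ 3) (h4 : p ≠ 4)
    (h5 : p ≠ 5) (h6 : p ≠ 6) (h7 : p ≠ 7) :
    sample_positions p = sample_positions_alt p := by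
  have hr : PySem.List.pyRange 0 8 1 = [0, 1, 2, 3, 4, 5, 6, 7] := by decide
  have ht : pvTable = PySem.Dict.mk
      [(1, [[[0, 0]], [], [], [], [], [], [], []]),
       (6, [[[0, 1], [0, 3], [0, 5], [0, 7]], [], [[2, 1], [2, 3], [2, 5], [2, 7]], [],
            [[4, 1], [4, 3], [4, 5], [4, 7]], [], [[6, 1], [6, 3], [6, 5], [6, 7]], []]),
       (4, [[[0, 2], [0, 6]], [], [], [], [[4, 2], [4, 6]], [], [], []]),
       (2, [[[0, 4]], [], [], [], [], [], [], []]),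
       (7, [[], [[1, 0], [1, 1], [1, 2], [1, 3], [1, 4], [1, 5], [1, 6], [1, 7]], [],
            [[3, 0], [3, 1], [3, 2], [3, 3], [3, 4], [3, 5], [3, 6], [3, 7]], [],
            [[5, 0], [5, 1], [5, 2], [5, 3], [5, 4], [5, 5], [5, 6], [5, 7]], [],
            [[7, 0], [7, 1], [7, 2], [7, 3], [7, 4], [7, 5], [7, 6], [7, 7]]]),
       (5, [[], [], [[2, 0], [2, 2], [2, 4], [2, 6]], [], [], [], [[6, 0], [6, 2], [6, 4], [6, 6]], []]),
       (3, [[], [], [], [], [[4, 0], [4, 4]], [], [], []])] := by decide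
  simp [sample_positions, sample_positions_alt, adam7_pattern, pvEmptyRows, hr, ht,
    PySem.List.pyGetD_ofNat', PySem.Dict.getD_eq_get?_getD, PySem.Dict.get?,
    Ne.symm h1, Ne.symm h2, Ne.symm h3, Ne.symm h4, Ne.symm h5, Ne.symm h6, Ne.symm h7]

-- ===== VERDICT (by name: the statement is the Claim_ definition above) =====
theorem sample_positions_spec : Claim_equal_sample_positions := by
  intro p _
  show sample_positions p = sample_positions_alt p
  by_cases h1 : p = 1; · subst h1; decide
  by_cases h2 : p = 2; · subst h2; decide
  by_cases h3 : p = 3; · subst h3; decide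
  by_cases h4 : p = 4; · subst h4; decide
  by_cases h5 : p = 5; · subst h5; decide
  by_cases h6 : p = 6; · subst h6; decide
  by_cases h7 : p = 7; · subst h7; decide
  exact pv_miss p h1 h2 h3 h4 h5 h6 h7
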